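-- pv_equiv track=rewrite | github.com/FelipeSanmiguel/Tarea5Dalgo | punto7.py | generar_sucesores
-- ===== SOURCE A (Python) =====
-- def max_solapamiento(cadena_a, cadena_b):
--     max_solap = 0
--     longitud_min = min(len(cadena_a), len(cadena_b))
--     for i in range(1, longitud_min + 1):
--         if cadena_a[-i:] == cadena_b[:i]:
--             max_solap = i
--     return max_solap
--
-- def generar_sucesores(lista_usados, cadena_actual, cadenas, k, visitados):
--     sucesores = []
--     n = len(cadenas)
--     for i in range(n):
--         if i in lista_usados:
--             continue
--         cadena_siguiente = cadenas[i]
--         solapamiento = max_solapamiento(cadena_actual, cadena_siguiente)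
--         nueva_cadena = cadena_actual + cadena_siguiente[solapamiento:]
--         nueva_lista_usados = lista_usados + [i]
--         clave_estado = tuple(sorted(nueva_lista_usados))
--         if len(nueva_cadena) <= k:
--             if clave_estado not in visitados or len(nueva_cadena) < visitados[clave_estado]:
--                 sucesores.append((nueva_lista_usados, nueva_cadena))
--     return sucesores
-- ===== SOURCE B (Python) =====
-- def _overlap(a, b):
--     # max k with a[-k:] == b[:k]: KMP prefix function of b, then stream a through it
--     n = len(b)
--     pi = [0]
--     j = 0
--     for c in b[1:]:
--         while j and b[j] != c:
--             j = pi[j - 1]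
--         if b[j] == c:
--             j += 1
--         pi.append(j)
--     j = 0
--     for c in a:
--         while j and (j == n or b[j] != c):
--             j = pi[j - 1]
--         if j < n and b[j] == c:
--             j += 1
--     return j
--
-- def generar_sucesores(lista_usados, cadena_actual, cadenas, k, visitados):
--     usados = set(lista_usados)
--     sucesores = []
--     for i, cadena_siguiente in enumerate(cadenas):
--         if i in usados:
--             continue
--         solapamiento = _overlap(cadena_actual, cadena_siguiente)
--         nueva_cadena = cadena_actual + cadena_siguiente[solapamiento:]
--         if len(nueva_cadena) <= k:
--             nueva_lista_usados = lista_usados + [i]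
--             clave_estado = tuple(sorted(nueva_lista_usados))
--             if clave_estado not in visitados or len(nueva_cadena) < visitados[clave_estado]:
--                 sucesores.append((nueva_lista_usados, nueva_cadena))
--     return sucesores
-- ===== Notes on version B (the rewrite author's own statement) =====
-- stated objective: faster
-- what changed: A finds each overlap by trying every i = 1..min(len) and comparing the fresh slices cadena_actual[-i:] == cadena_siguiente[:i] (quadratic per pair); B computes the maximal suffix-prefix overlap in linear time with KMP: prefix function of cadena_siguiente, then streaming cadena_actual through the failure automaton; used indices are tested against a set.
import Mathlib
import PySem

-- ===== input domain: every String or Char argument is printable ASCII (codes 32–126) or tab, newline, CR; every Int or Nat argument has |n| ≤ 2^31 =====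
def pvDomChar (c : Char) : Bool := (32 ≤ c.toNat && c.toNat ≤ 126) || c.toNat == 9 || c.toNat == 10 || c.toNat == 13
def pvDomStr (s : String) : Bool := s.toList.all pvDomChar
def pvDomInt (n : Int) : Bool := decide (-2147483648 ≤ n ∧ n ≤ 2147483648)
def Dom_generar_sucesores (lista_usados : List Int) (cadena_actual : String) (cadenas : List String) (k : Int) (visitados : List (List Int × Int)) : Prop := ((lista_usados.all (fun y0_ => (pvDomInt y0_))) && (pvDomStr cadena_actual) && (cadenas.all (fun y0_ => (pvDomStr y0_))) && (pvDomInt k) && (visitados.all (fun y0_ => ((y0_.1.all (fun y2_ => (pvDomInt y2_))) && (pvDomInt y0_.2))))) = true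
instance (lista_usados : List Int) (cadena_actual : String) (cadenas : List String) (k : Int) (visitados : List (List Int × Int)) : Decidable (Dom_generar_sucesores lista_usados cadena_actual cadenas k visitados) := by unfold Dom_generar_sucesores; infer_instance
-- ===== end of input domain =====

-- B replaces A's quadratic slice-comparison overlap search by a linear KMP prefix-function pass
-- (and a set for the used-index test); same successors in the same order.

-- ===== PORT A =====
-- helper of A: max overlap, trying every i = 1..min(len a, len b) with slice comparisons
def max_solapamiento (cadena_a : String) (cadena_b : String) : Int :=
  let longitud_min : Int := min (PySem.Str.len cadena_a) (PySem.Str.len cadena_b)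
  (PySem.List.pyRange 1 (longitud_min + 1) 1).foldl
    (fun max_solap i =>
      if PySem.List.slice cadena_a.toList (some (-i)) none =
         PySem.List.slice cadena_b.toList none (some i)
      then i else max_solap) 0

def generar_sucesores (lista_usados : List Int) (cadena_actual : String) (cadenas : List String) (k : Int) (visitados : List (List Int × Int)) : List (List Int × String) :=
  let n : Int := (cadenas.length : Int)
  (PySem.List.pyRange 0 n 1).foldl
    (fun sucesores i =>
      if lista_usados.contains i then sucesores
      else
        let cadena_siguiente := PySem.List.pyGetD cadenas i ""
        let solapamiento := max_solapamiento cadena_actual cadena_siguiente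
        -- string concatenation / slice done on the character lists (exact)
        let nueva_cadena := String.ofList (cadena_actual.toList ++
          PySem.List.slice cadena_siguiente.toList (some solapamiento) none)
        let nueva_lista_usados := lista_usados ++ [i]
        let clave_estado := PySem.List.sorted nueva_lista_usados (fun x => x) false
        if PySem.Str.len nueva_cadena ≤ k then
          if (match (PySem.Dict.mk visitados).get? clave_estado with
              | none => true
              | some v => decide (PySem.Str.len nueva_cadena < v))
          then sucesores ++ [(nueva_lista_usados, nueva_cadena)]
          else sucesores
        else sucesores)
    []

-- ===== PORT B =====
-- B-side helpers: KMP overlap (Source B's _overlap): prefix function of b, then stream a through it.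
-- the `while j and b[j] != c: j = pi[j-1]` loop; fuel = current j bounds its iterations
-- (each iteration strictly decreases j, so fuel j is enough and never changes the result)
def kmpFall (s : List Char) (pi : List Nat) (c : Char) : Nat → Nat → Nat
  | 0, j => j
  | fuel + 1, j => if 0 < j ∧ s.getD j ' ' ≠ c then kmpFall s pi c fuel (pi.getD (j - 1) 0) else j

-- the scan-phase `while j and (j == n or b[j] != c): j = pi[j-1]` loop, same fuel scheme
def kmpFall2 (b : List Char) (pi : List Nat) (n : Nat) (c : Char) : Nat → Nat → Nat
  | 0, j => j
  | fuel + 1, j =>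
    if 0 < j ∧ (j = n ∨ b.getD j ' ' ≠ c) then kmpFall2 b pi n c fuel (pi.getD (j - 1) 0) else j

def overlapKMP (a : List Char) (b : List Char) : Nat :=
  let n := b.length
  -- for c in b[1:]: … pi.append(j)
  let st := (PySem.List.slice b (some 1) none).foldl
    (fun st c =>
      let j0 := kmpFall b st.1 c st.2 st.2
      let j := if b.getD j0 ' ' = c then j0 + 1 else j0
      (st.1 ++ [j], j))
    ([0], 0)
  -- for c in a: …
  a.foldl
    (fun j c =>
      let j0 := kmpFall2 b st.1 n c j j
      if j0 < n ∧ b.getD j0 ' ' = c then j0 + 1 else j0)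
    0

def generar_sucesores_alt (lista_usados : List Int) (cadena_actual : String) (cadenas : List String) (k : Int) (visitados : List (List Int × Int)) : List (List Int × String) :=
  let usados : PySem.Set Int := PySem.Set.ofList lista_usados
  (PySem.List.enumerate cadenas 0).foldl
    (fun sucesores p =>
      if PySem.Set.contains usados p.1 then sucesores
      else
        let solapamiento := overlapKMP cadena_actual.toList p.2.toList
        let nueva_cadena := String.ofList (cadena_actual.toList ++ p.2.toList.drop solapamiento)
        if PySem.Str.len nueva_cadena ≤ k then
          let nueva_lista_usados := lista_usados ++ [p.1]
          let clave_estado := PySem.List.sorted nueva_lista_usados (fun x => x) false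
          match (PySem.Dict.mk visitados).get? clave_estado with
          | none => sucesores ++ [(nueva_lista_usados, nueva_cadena)]
          | some v =>
            if PySem.Str.len nueva_cadena < v then sucesores ++ [(nueva_lista_usados, nueva_cadena)]
            else sucesores
        else sucesores)
    []

-- ===== PRECONDITION & SPEC =====
def Spec_generar_sucesores (lista_usados : List Int) (cadena_actual : String) (cadenas : List String) (k : Int) (visitados : List (List Int × Int)) (out : List (List Int × String)) : Prop := out = generar_sucesores_alt lista_usados cadena_actual cadenas k visitados
instance (lista_usados : List Int) (cadena_actual : String) (cadenas : List String) (k : Int) (visitados : List (List Int × Int)) (out : List (List Int × String)) : Decidable (Spec_generar_sucesores lista_usados cadena_actual cadenas k visitados out) := by unfold Spec_generar_sucesores; infer_instance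

-- ===== CLAIM (what is proved, stated in full; the proofs are below) =====
def Claim_equal_generar_sucesores : Prop := ∀ (lista_usados : List Int) (cadena_actual : String) (cadenas : List String) (k : Int) (visitados : List (List Int × Int)), Dom_generar_sucesores lista_usados cadena_actual cadenas k visitados → Spec_generar_sucesores lista_usados cadena_actual cadenas k visitados (generar_sucesores lista_usados cadena_actual cadenas k visitados)

-- ===== LEMMAS AND PROOFS =====

-- `k` is a (proper) border of `t`: a prefix of length k that is also a suffix
abbrev Bord (t : List Char) (k : Nat) : Prop := k < t.length ∧ t.take k = t.drop (t.length - k)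


-- the longest border of t (0 for t = [])
def maxB (t : List Char) : Nat := Nat.findGreatest (Bord t) t.length

theorem bord_zero (t : List Char) (h : t ≠ []) : Bord t 0 := by
  constructor
  · exact List.length_pos_iff.mpr h
  · simp

theorem bord_lt {t : List Char} {k : Nat} (h : Bord t k) : k < t.length := h.1

theorem le_maxB {t : List Char} {k : Nat} (h : Bord t k) : k ≤ maxB t :=
  Nat.le_findGreatest (Nat.le_of_lt h.1) h

theorem maxB_bord {t : List Char} (h : t ≠ []) : Bord t (maxB t) :=
  Nat.findGreatest_spec (m := 0) (Nat.zero_le _) (bord_zero t h)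

theorem maxB_lt {t : List Char} (h : t ≠ []) : maxB t < t.length :=
  bord_lt (maxB_bord h)

-- border of a border is a border
theorem bord_trans {t : List Char} {m k : Nat} (hm : Bord t m) (hk : Bord (t.take m) k) :
    Bord t k := by
  obtain ⟨hm1, hm2⟩ := hm
  obtain ⟨hk1, hk2⟩ := hk
  rw [List.length_take] at hk1
  have hkm : k < m := lt_of_lt_of_le hk1 (min_le_left _ _)
  refine ⟨lt_trans hkm hm1, ?_⟩
  have h1 : (t.take m).take k = t.take k := by
    rw [List.take_take]; congr 1; omega
  have h2 : (t.take m).drop ((t.take m).length - k) = t.drop (t.length - k) := by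
    rw [hm2, List.drop_drop]
    congr 1
    simp [List.length_drop]
    omega
  rw [← h1, ← h2, hk2]

-- a smaller border is a border of the bigger border's prefix
theorem bord_down {t : List Char} {m k : Nat} (hk : Bord t k) (hm : Bord t m) (hkm : k < m) :
    Bord (t.take m) k := by
  obtain ⟨hk1, hk2⟩ := hk
  obtain ⟨hm1, hm2⟩ := hm
  refine ⟨by rw [List.length_take]; omega, ?_⟩
  have h1 : (t.take m).take k = t.take k := by
    rw [List.take_take]; congr 1; omega
  have h2 : (t.take m).drop ((t.take m).length - k) = t.drop (t.length - k) := by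
    rw [hm2, List.drop_drop]
    congr 1
    simp [List.length_drop]
    omega
  rw [h1, h2, hk2]

-- borders of t ++ [c] of positive length
theorem bord_snoc {t : List Char} {c : Char} {k : Nat} :
    Bord (t ++ [c]) (k + 1) ↔ Bord t k ∧ t.getD k ' ' = c := by
  constructor
  · rintro ⟨h1, h2⟩
    simp [List.length_append] at h1
    have hk : k < t.length := by omega
    have htake : (t ++ [c]).take (k + 1) = t.take k ++ [t.getD k ' '] := by
      rw [List.take_append_of_le_length (by omega), List.take_add_one]
      simp [List.getElem?_eq_getElem hk]
    have hdrop : (t ++ [c]).drop ((t ++ [c]).length - (k + 1)) = t.drop (t.length - k) ++ [c] := by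
      rw [List.drop_append_of_le_length (by simp)]
      congr 2
      simp only [List.length_append, List.length_cons, List.length_nil]
      omega
    rw [htake, hdrop] at h2
    have hlen : (t.take k).length = (t.drop (t.length - k)).length := by
      simp; omega
    obtain ⟨e1, e2⟩ := List.append_inj h2 (by simpa using hlen)
    have e2' : t.getD k ' ' = c := by simpa using e2
    exact ⟨⟨hk, e1⟩, e2'⟩
  · rintro ⟨⟨hk, h2⟩, hc⟩
    refine ⟨by simp; omega, ?_⟩
    have htake : (t ++ [c]).take (k + 1) = t.take k ++ [t.getD k ' '] := by
      rw [List.take_append_of_le_length (by omega), List.take_add_one]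
      simp [List.getElem?_eq_getElem hk]
    have hdrop : (t ++ [c]).drop ((t ++ [c]).length - (k + 1)) = t.drop (t.length - k) ++ [c] := by
      rw [List.drop_append_of_le_length (by simp)]
      congr 2
      simp only [List.length_append, List.length_cons, List.length_nil]
      omega
    rw [htake, hdrop, h2, hc]

theorem maxB_singleton (c : Char) : maxB [c] = 0 := by
  have h := maxB_lt (t := [c]) (by simp)
  simpa using Nat.lt_one_iff.mp (by simpa using h)

-- the while-loop + increment computes the longest border of t ++ [c],
-- starting from any border j of t dominating all c-matching borders
theorem fall_spec (s : List Char) (pi : List Nat) (t : List Char) (m : Nat)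
    (ht : t = s.take m) (hm : m ≤ s.length)
    (hpi : ∀ x, x < m → pi.getD x 0 = maxB (s.take (x + 1)))
    (c : Char) :
    ∀ j fuel, j ≤ fuel → Bord t j → (∀ kk, Bord t kk → t.getD kk ' ' = c → kk ≤ j) →
      (if s.getD (kmpFall s pi c fuel j) ' ' = c then kmpFall s pi c fuel j + 1
       else kmpFall s pi c fuel j) = maxB (t ++ [c]) := by
  intro j
  induction j using Nat.strong_induction_on with
  | _ j ih =>
    intro fuel hfuel hbord hdom
    have htlen : t.length = min m s.length := by rw [ht]; simp
    have hjt : j < t.length := hbord.1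
    have hgetD : ∀ x, x < t.length → t.getD x ' ' = s.getD x ' ' := by
      intro x hx
      rw [ht, List.getD_eq_getElem?_getD, List.getD_eq_getElem?_getD,
        List.getElem?_take_of_lt (by omega)]
    by_cases hc : s.getD j ' ' = c
    · have hc' : s[j]?.getD ' ' = c := by simpa [List.getD] using hc
      have hfall : kmpFall s pi c fuel j = j := by
        cases fuel <;> simp [kmpFall, List.getD, hc']
      rw [hfall, if_pos hc]
      have htj : t.getD j ' ' = c := by rw [hgetD j hjt]; exact hc
      have hb1 : Bord (t ++ [c]) (j + 1) := bord_snoc.mpr ⟨hbord, htj⟩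
      refine Nat.le_antisymm (le_maxB hb1) ?_
      cases hmb : maxB (t ++ [c]) with
      | zero => omega
      | succ kk =>
        have hbk := maxB_bord (t := t ++ [c]) (by simp)
        rw [hmb] at hbk
        obtain ⟨hbk', hck⟩ := bord_snoc.mp hbk
        exact Nat.succ_le_succ (hdom kk hbk' hck)
    · by_cases hj : j = 0
      · subst hj
        have hfall : kmpFall s pi c fuel 0 = 0 := by
          cases fuel <;> simp [kmpFall]
        rw [hfall, if_neg hc]
        cases hmb : maxB (t ++ [c]) with
        | zero => rfl
        | succ kk =>
          exfalso
          have hbk := maxB_bord (t := t ++ [c]) (by simp)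
          rw [hmb] at hbk
          obtain ⟨hbk', hck⟩ := bord_snoc.mp hbk
          have hk0 : kk = 0 := Nat.le_zero.mp (hdom kk hbk' hck)
          subst hk0
          rw [hgetD 0 (by omega)] at hck
          exact hc hck
      · cases fuel with
        | zero => omega
        | succ fuel' =>
          have hj0 : 0 < j := Nat.pos_of_ne_zero hj
          have hc' : ¬ s[j]?.getD ' ' = c := by simpa [List.getD] using hc
          have step : kmpFall s pi c (fuel' + 1) j = kmpFall s pi c fuel' (pi.getD (j - 1) 0) := by
            simp [kmpFall, List.getD, hc', hj0]
          have hjm : j ≤ m := by omega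
          have hstake : s.take j = t.take j := by
            rw [ht, List.take_take, min_eq_left hjm]
          have hj' : pi.getD (j - 1) 0 = maxB (t.take j) := by
            rw [hpi (j - 1) (by omega), ← hstake]
            congr 2
            omega
          set j' := pi.getD (j - 1) 0 with hj'def
          have hlen_tj : (t.take j).length = j := by simp; omega
          have htj_ne : t.take j ≠ [] := by
            intro h
            rw [h] at hlen_tj
            simp at hlen_tj
            omega
          have hbord'' : Bord (t.take j) j' := by rw [hj']; exact maxB_bord htj_ne
          have hbord' : Bord t j' := bord_trans hbord hbord''
          have hj'lt : j' < j := by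
            have := maxB_lt htj_ne
            rw [← hj', hlen_tj] at this
            exact this
          have hdom' : ∀ kk, Bord t kk → t.getD kk ' ' = c → kk ≤ j' := by
            intro kk hbk hck
            have hkj : kk ≤ j := hdom kk hbk hck
            have hkne : kk ≠ j := by
              intro h
              subst h
              rw [hgetD kk hbk.1] at hck
              exact hc hck
            have hkk : kk < j := lt_of_le_of_ne hkj hkne
            have : Bord (t.take j) kk := bord_down hbk hbord hkk
            rw [hj']
            exact le_maxB this
          rw [step]
          exact ih j' hj'lt fuel' (by omega) hbord' hdom' 

-- running the KMP fold over indices 1..m-1 yields (prefix-function values, maxB of the m-prefix)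
theorem kmp_invariant (s : List Char) (hs : s ≠ []) (m : Nat) (h1 : 1 ≤ m) (hm : m ≤ s.length) :
    ((PySem.List.pyRange 1 (m : Int) 1).foldl
      (fun st i =>
        let c := PySem.List.pyGetD s i ' '
        let j0 := kmpFall s st.1 c st.2 st.2
        let j := if s.getD j0 ' ' = c then j0 + 1 else j0
        (st.1 ++ [j], j))
      ([0], 0)) = ((List.range m).map (fun x => maxB (s.take (x + 1))), maxB (s.take m)) := by
  induction m, h1 using Nat.le_induction with
  | base =>
    rw [PySem.List.pyRange_one_eq_nil (by norm_num)]
    cases s with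
    | nil => exact absurd rfl hs
    | cons x xs =>
      simp [List.foldl_nil, maxB_singleton]
  | succ n hn ihn =>
    have hns : n ≤ s.length := by omega
    have hnlt : n < s.length := by omega
    have ih := ihn hns
    have hcast : ((n + 1 : Nat) : Int) = (n : Int) + 1 := by push_cast; ring
    rw [hcast, PySem.List.pyRange_one_succ_right (by exact_mod_cast hn), List.foldl_append,
      ih, List.foldl_cons, List.foldl_nil]
    set P := (List.range n).map (fun x => maxB (s.take (x + 1))) with hP
    have hPget : ∀ x, x < n → P.getD x 0 = maxB (s.take (x + 1)) := by
      intro x hx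
      rw [hP, List.getD_eq_getElem _ _ (by simp [hx])]
      simp
    have htne : s.take n ≠ [] := by
      intro h
      have := congrArg List.length h
      simp [min_eq_left hns] at this
      omega
    have hc : PySem.List.pyGetD s ((n : Int)) ' ' = s.getD n ' ' := by
      rw [PySem.List.pyGetD_natCast]
    have hfall := fall_spec s P (s.take n) n rfl hns hPget (s.getD n ' ')
      (maxB (s.take n)) (maxB (s.take n)) le_rfl (maxB_bord htne)
      (fun kk hbk hck => le_maxB hbk)
    have htake : s.take n ++ [s.getD n ' '] = s.take (n + 1) := by
      rw [List.take_add_one]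
      congr 1
      simp [List.getD_eq_getElem?_getD, List.getElem?_eq_getElem hnlt]
    rw [htake] at hfall
    dsimp only
    rw [hc, hfall]
    simp [hP, List.range_succ]

-- A's ascending keep-last scan over i = 1..m computes the greatest matching overlap
theorem quad_fold (A B : List Char) (m : Nat) :
    (PySem.List.pyRange 1 ((m : Int) + 1) 1).foldl
      (fun max_solap i =>
        if PySem.List.slice A (some (-i)) none = PySem.List.slice B none (some i)
        then i else max_solap) 0
    = (Nat.findGreatest (fun k => A.drop (A.length - k) = B.take k) m : Int) := by
  induction m with
  | zero =>
    rw [show ((0 : Nat) : Int) + 1 = 1 by norm_num, PySem.List.pyRange_one_eq_nil le_rfl]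
    simp
  | succ n ih =>
    rw [show ((n + 1 : Nat) : Int) + 1 = ((n : Int) + 1) + 1 by push_cast; ring,
      PySem.List.pyRange_one_succ_right (by omega), List.foldl_append, ih,
      List.foldl_cons, List.foldl_nil, Nat.findGreatest_succ]
    rw [show (-((n : Int) + 1)) = -(((n + 1 : Nat)) : Int) by push_cast; ring,
      show ((n : Int) + 1) = ((n + 1 : Nat) : Int) by push_cast; ring,
      PySem.List.slice_from_neg_natCast A (n + 1) (by omega), PySem.List.slice_to_natCast]
    split_ifs with h
    · push_cast; ring
    · rfl

-- B's two-phase KMP overlap equals max{k ≤ min(|a|,|b|) : a ends with b[:k]}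
-- `b.take k` is a suffix of `p` (stated through drop; k ≤ b.length is carried separately)
abbrev SP (b p : List Char) (k : Nat) : Prop := p.drop (p.length - k) = b.take k

-- the longest k ≤ |b| with b.take k a suffix of p
def maxSP (b p : List Char) : Nat := Nat.findGreatest (SP b p) b.length

theorem sp_zero (b p : List Char) : SP b p 0 := by simp [SP]

theorem sp_le_plen {b p : List Char} {k : Nat} (hk : k ≤ b.length) (h : SP b p k) :
    k ≤ p.length := by
  have := congrArg List.length h
  simp at this
  omega

theorem le_maxSP {b p : List Char} {k : Nat} (hk : k ≤ b.length) (h : SP b p k) :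
    k ≤ maxSP b p := Nat.le_findGreatest hk h

theorem maxSP_le (b p : List Char) : maxSP b p ≤ b.length := Nat.findGreatest_le _

theorem maxSP_sp (b p : List Char) : SP b p (maxSP b p) :=
  Nat.findGreatest_spec (m := 0) (Nat.zero_le _) (sp_zero b p)

theorem sp_snoc {b p : List Char} {c : Char} {k : Nat} (hk : k < b.length) :
    SP b (p ++ [c]) (k + 1) ↔ SP b p k ∧ b.getD k ' ' = c := by
  have hbk : b.take (k + 1) = b.take k ++ [b.getD k ' '] := by
    rw [List.take_add_one]
    simp [List.getElem?_eq_getElem hk]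
  constructor
  · intro h
    have hklen : k ≤ p.length := by
      have := congrArg List.length h
      simp at this
      omega
    simp only [SP] at h
    rw [show (p ++ [c]).length - (k + 1) = p.length - k by simp,
      List.drop_append_of_le_length (by omega), hbk] at h
    obtain ⟨e1, e2⟩ := List.append_inj h (by simp; omega)
    exact ⟨e1, by simpa using e2.symm⟩
  · rintro ⟨h1, h2⟩
    have hklen : k ≤ p.length := sp_le_plen (by omega) h1
    simp only [SP]
    rw [show (p ++ [c]).length - (k + 1) = p.length - k by simp,
      List.drop_append_of_le_length (by omega), hbk, h1, h2]

-- two b-prefix suffixes of the same p: the shorter is a border of the longer's prefix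
theorem sp_to_bord {b p : List Char} {j k : Nat} (hj : SP b p j) (hjn : j ≤ b.length)
    (hk : SP b p k) (hkj : k < j) : Bord (b.take j) k := by
  have hjp : j ≤ p.length := sp_le_plen hjn hj
  refine ⟨by simp; omega, ?_⟩
  have h1 : (b.take j).take k = b.take k := by rw [List.take_take]; congr 1; omega
  have h2 : (b.take j).drop ((b.take j).length - k) = b.take k := by
    rw [← hj, List.drop_drop, ← hk]
    congr 1
    simp
    omega
  rw [h1, h2]

theorem bord_to_sp {b p : List Char} {j k : Nat} (hj : SP b p j) (hjn : j ≤ b.length)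
    (hk : Bord (b.take j) k) : SP b p k := by
  have hjp : j ≤ p.length := sp_le_plen hjn hj
  obtain ⟨hk1, hk2⟩ := hk
  rw [List.length_take] at hk1
  have hkj : k < j := by omega
  have h1 : (b.take j).take k = b.take k := by rw [List.take_take]; congr 1; omega
  have h2 : (b.take j).drop ((b.take j).length - k) = p.drop (p.length - k) := by
    rw [← hj, List.drop_drop]
    congr 1
    simp
    omega
  rw [h1, h2] at hk2
  exact hk2.symm

-- the scan-phase while-loop + guarded increment computes maxSP b (p ++ [c]),
-- starting from any b-prefix suffix j of p dominating all c-matching ones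
theorem fall2_spec (b : List Char) (pi : List Nat) (p : List Char)
    (hpi : ∀ x, x < b.length → pi.getD x 0 = maxB (b.take (x + 1))) (c : Char) :
    ∀ j fuel, j ≤ fuel → j ≤ b.length → SP b p j →
      (∀ kk, kk < b.length → SP b p kk → b.getD kk ' ' = c → kk ≤ j) →
      (if kmpFall2 b pi b.length c fuel j < b.length ∧
          b.getD (kmpFall2 b pi b.length c fuel j) ' ' = c
       then kmpFall2 b pi b.length c fuel j + 1
       else kmpFall2 b pi b.length c fuel j) = maxSP b (p ++ [c]) := by
  intro j
  induction j using Nat.strong_induction_on with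
  | _ j ih =>
    intro fuel hfuel hjn hsp hdom
    by_cases hcond : 0 < j ∧ (j = b.length ∨ b.getD j ' ' ≠ c)
    · -- while-loop body fires: fall back to pi[j-1] = maxB (b.take j)
      obtain ⟨hj0, hor⟩ := hcond
      cases fuel with
      | zero => omega
      | succ fuel' =>
        have step : kmpFall2 b pi b.length c (fuel' + 1) j =
            kmpFall2 b pi b.length c fuel' (pi.getD (j - 1) 0) := by
          simp only [kmpFall2, if_pos (And.intro hj0 hor)]
        have hj' : pi.getD (j - 1) 0 = maxB (b.take j) := by
          rw [hpi (j - 1) (by omega)]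
          congr 2
          omega
        set j' := pi.getD (j - 1) 0 with hj'def
        have hlen_tj : (b.take j).length = j := by simp; omega
        have htj_ne : b.take j ≠ [] := by
          intro h
          rw [h] at hlen_tj
          simp at hlen_tj
          omega
        have hbordj' : Bord (b.take j) j' := by rw [hj']; exact maxB_bord htj_ne
        have hj'lt : j' < j := by
          have := maxB_lt htj_ne
          rw [← hj', hlen_tj] at this
          exact this
        have hsp' : SP b p j' := bord_to_sp hsp hjn hbordj'
        have hdom' : ∀ kk, kk < b.length → SP b p kk → b.getD kk ' ' = c → kk ≤ j' := by
          intro kk hkn hkk hck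
          have hkj : kk ≤ j := hdom kk hkn hkk hck
          have hkne : kk ≠ j := by
            intro h
            subst h
            rcases hor with h | h
            · omega
            · exact h hck
          have : Bord (b.take j) kk := sp_to_bord hsp hjn hkk (by omega)
          rw [hj']
          exact le_maxB this
        rw [step]
        exact ih j' hj'lt fuel' (by omega) (by omega) hsp' hdom'
    · -- loop exits: j = 0, or j < |b| with b[j] = c
      have hfall : kmpFall2 b pi b.length c fuel j = j := by
        cases fuel with
        | zero => simp [kmpFall2]
        | succ f => simp only [kmpFall2, if_neg hcond]
      rw [hfall]
      by_cases hmatch : j < b.length ∧ b.getD j ' ' = c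
      · rw [if_pos hmatch]
        have hcand : SP b (p ++ [c]) (j + 1) := (sp_snoc hmatch.1).mpr ⟨hsp, hmatch.2⟩
        refine Nat.le_antisymm (le_maxSP (by omega) hcand) ?_
        cases hmb : maxSP b (p ++ [c]) with
        | zero => omega
        | succ kk =>
          have hsp2 := maxSP_sp b (p ++ [c])
          have hle2 := maxSP_le b (p ++ [c])
          rw [hmb] at hsp2 hle2
          obtain ⟨hk1, hk2⟩ := (sp_snoc (by omega)).mp hsp2
          exact Nat.succ_le_succ (hdom kk (by omega) hk1 hk2)
      · rw [if_neg hmatch]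
        have hj0 : j = 0 := by
          by_contra h
          exact hmatch (by
            rcases not_and_or.mp hcond with h1 | h1
            · omega
            · refine ⟨by omega, ?_⟩
              by_contra hc
              exact h1 (Or.inr hc))
        subst hj0
        cases hmb : maxSP b (p ++ [c]) with
        | zero => rfl
        | succ kk =>
          exfalso
          have hsp2 := maxSP_sp b (p ++ [c])
          have hle2 := maxSP_le b (p ++ [c])
          rw [hmb] at hsp2 hle2
          obtain ⟨hk1, hk2⟩ := (sp_snoc (by omega)).mp hsp2
          have hkk0 : kk ≤ 0 := hdom kk (by omega) hk1 hk2
          have : kk = 0 := by omega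
          subst this
          exact hmatch ⟨by omega, hk2⟩

-- streaming the whole of `rest` through the automaton
theorem scan_spec (b : List Char) (pi : List Nat)
    (hpi : ∀ x, x < b.length → pi.getD x 0 = maxB (b.take (x + 1))) :
    ∀ (rest p : List Char),
      rest.foldl
        (fun j c =>
          let j0 := kmpFall2 b pi b.length c j j
          if j0 < b.length ∧ b.getD j0 ' ' = c then j0 + 1 else j0)
        (maxSP b p) = maxSP b (p ++ rest) := by
  intro rest
  induction rest with
  | nil => intro p; simp
  | cons c rest ih =>
    intro p
    rw [List.foldl_cons]
    have hstep := fall2_spec b pi p hpi c (maxSP b p) (maxSP b p) le_rfl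
      (maxSP_le b p) (maxSP_sp b p)
      (fun kk hkn hkk _ => le_maxSP (by omega) hkk)
    dsimp only
    rw [hstep, show p ++ c :: rest = (p ++ [c]) ++ rest by simp]
    exact ih (p ++ [c])

theorem maxSP_nil {b : List Char} : maxSP b [] = 0 := by
  cases hmb : maxSP b [] with
  | zero => rfl
  | succ kk =>
    exfalso
    have hsp2 := maxSP_sp b []
    have hle2 := maxSP_le b []
    rw [hmb] at hsp2 hle2
    have := congrArg List.length hsp2
    simp at this
    omega

theorem maxSP_eq_findGreatest (a b : List Char) :
    maxSP b a =
      Nat.findGreatest (fun k => a.drop (a.length - k) = b.take k) (min a.length b.length) := by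
  refine Nat.le_antisymm ?_ ?_
  · have h1 := maxSP_sp b a
    have h2 := maxSP_le b a
    have h3 := sp_le_plen h2 h1
    exact Nat.le_findGreatest (by omega) h1
  · have h1 := Nat.findGreatest_spec (P := fun k => a.drop (a.length - k) = b.take k)
      (m := 0) (n := min a.length b.length) (Nat.zero_le _) (by simp)
    have h2 := Nat.findGreatest_le (P := fun k => a.drop (a.length - k) = b.take k)
      (n := min a.length b.length)
    exact le_maxSP (le_trans h2 (min_le_right _ _)) h1

-- phase 1 of overlapKMP: the prefix-function fold over b[1:]
theorem phase1_eq (b : List Char) (hb : b ≠ []) :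
    b.tail.foldl
      (fun st c =>
        let j0 := kmpFall b st.1 c st.2 st.2
        let j := if b.getD j0 ' ' = c then j0 + 1 else j0
        (st.1 ++ [j], j))
      ([0], 0)
    = ((List.range b.length).map (fun x => maxB (b.take (x + 1))), maxB b) := by
  have h2 := PySem.List.foldl_pyRange_pyGetD' (xs := b) (d := ' ')
    (f := fun st c =>
      let j0 := kmpFall b st.1 c st.2 st.2
      let j := if b.getD j0 ' ' = c then j0 + 1 else j0
      (st.1 ++ [j], j))
    (init := (([0], 0) : List Nat × Nat)) (a := 1) (by norm_num)
  norm_num at h2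
  have h := kmp_invariant b hb b.length (by
    have : 0 < b.length := List.length_pos_iff.mpr hb
    omega) le_rfl
  rw [List.take_length] at h
  norm_num at h
  norm_num
  rw [← h2]
  exact h

theorem overlap_correct (a b : List Char) :
    overlapKMP a b =
      Nat.findGreatest (fun k => a.drop (a.length - k) = b.take k) (min a.length b.length) := by
  rw [← maxSP_eq_findGreatest]
  unfold overlapKMP
  rw [PySem.List.slice_from_one]
  by_cases hb : b = []
  · subst hb
    have hfold : ∀ (l : List Char) ,
        l.foldl
          (fun j c =>
            let j0 := kmpFall2 [] [0] 0 c j j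
            if j0 < 0 ∧ List.getD [] j0 ' ' = c then j0 + 1 else j0)
          0 = 0 := by
      intro l
      induction l with
      | nil => rfl
      | cons c l ih => simpa [kmpFall2] using ih
    simpa [maxSP] using hfold a
  · rw [phase1_eq b hb]
    dsimp only
    have hpi : ∀ x, x < b.length →
        ((List.range b.length).map (fun x => maxB (b.take (x + 1)))).getD x 0 =
          maxB (b.take (x + 1)) := by
      intro x hx
      rw [List.getD_eq_getElem _ _ (by simp [hx])]
      simp
    have hscan := scan_spec b ((List.range b.length).map (fun x => maxB (b.take (x + 1)))) hpi a []
    rw [maxSP_nil] at hscan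
    simpa using hscan

theorem max_solapamiento_eq (a b : String) :
    max_solapamiento a b = (overlapKMP a.toList b.toList : Int) := by
  unfold max_solapamiento
  rw [overlap_correct]
  dsimp only
  rw [show min (PySem.Str.len a) (PySem.Str.len b)
      = ((min a.toList.length b.toList.length : Nat) : Int) by
    simp [PySem.Str.len_eq]]
  exact quad_fold a.toList b.toList (min a.toList.length b.toList.length)


-- ===== VERDICT (by name: the statement is the Claim_ definition above) =====
set_option maxHeartbeats 1000000 in
theorem generar_sucesores_spec : Claim_equal_generar_sucesores := by
  intro lista_usados cadena_actual cadenas k visitados _hdom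
  unfold Spec_generar_sucesores
  unfold generar_sucesores generar_sucesores_alt
  rw [PySem.List.enumerate_eq_map_pyRange (d := ""), List.foldl_map]
  dsimp only
  apply PySem.List.foldl_congr_mem
  intro acc i hi
  rw [PySem.List.mem_pyRange_one] at hi
  obtain ⟨hi0, hin⟩ := hi
  obtain ⟨j, rfl, hj⟩ : ∃ (j : Nat), i = (j : Int) ∧ j < cadenas.length :=
    ⟨i.toNat, by omega, by omega⟩
  have hcont : PySem.Set.contains (PySem.Set.ofList lista_usados) ((j : Int)) =
      lista_usados.contains ((j : Int)) := by
    simp [PySem.Set.contains, PySem.Set.mem_ofList]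
  have hov : max_solapamiento cadena_actual (PySem.List.pyGetD cadenas (j : Int) "") =
      ((overlapKMP cadena_actual.toList (PySem.List.pyGetD cadenas (j : Int) "").toList : Nat) : Int) :=
    max_solapamiento_eq _ _
  rw [hcont, hov, PySem.List.slice_from_natCast]
  cases hd : (PySem.Dict.mk visitados).get?
      (PySem.List.sorted (lista_usados ++ [(j : Int)]) (fun x => x) false) with
  | none => dsimp only; split_ifs <;> simp_all
  | some v =>
    dsimp only
    simp only [decide_eq_true_eq]
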